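-- pv_equiv track=rewrite | github.com/ForCodingTest/Programmers | day15/17678-[1차] 셔틀버스/wgwjh05169.py | solution
-- ===== SOURCE A (Python) =====
-- def solution(n, t, m, timetable):
--     start = 9 * 60
--     bus = [[start + (t * i)] for i in range(n)]    # bus[i]: i번째 버스의 [출발시간, 탑승크루의도착시간1, 탑승크루의도착시간2, ..., 탑승크루의도착시간j] - j는 최대 m
--     timetable = sorted(list(map(get_minute, timetable)))
--     i = 0
--     for arrive in timetable:  # 버스 태우기
--         while i < n:
--             if bus[i][0] >= arrive and len(bus[i]) < m + 1:   # 버스보다 먼저 왔고 버스에 자리가 있으면 태우기 위해 break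
--                 break
--             i += 1
--
--         if i < n:
--             bus[i].append(arrive)
--         else:
--             break
--
--     if len(bus[-1]) < m + 1:  # 마지막 버스에 빈 자리 있으면 도착 시간에 도착
--         return get_time(bus[-1][0])
--     if len(bus[-1]) >= m + 1: # 마지막 버스에 자리 없으면 마지막으로 탄 크루보다 1분 빨리 도착
--         return get_time(bus[-1][-1] - 1)
--
-- def get_minute(string):
--     h, m = map(int, string.split(":"))
--     return h * 60 + m
--
-- def get_time(minute):
--     h = minute // 60
--     m = minute % 60
--     return str(h).zfill(2) + ":" + str(m).zfill(2)
-- ===== SOURCE B (Python) =====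
-- # B: boards crew bus-by-bus with one pointer into the sorted arrival list,
-- # tracking only the last bus's boarded count and last boarded arrival.
-- def solution(n, t, m, timetable):
--     arr = sorted(map(get_minute, timetable))
--     p = 0
--     for k in range(n):
--         dep = 540 + t * k
--         boarded = 0
--         last = None
--         while p < len(arr) and boarded < m and arr[p] <= dep:
--             last = arr[p]
--             boarded += 1
--             p += 1
--     if boarded < m:
--         return get_time(dep)
--     return get_time(last - 1)
--
-- def get_minute(string):
--     h, m = map(int, string.split(":"))
--     return h * 60 + m
--
-- def get_time(minute):
--     h = minute // 60
--     m = minute % 60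
--     return str(h).zfill(2) + ":" + str(m).zfill(2)
-- ===== Notes on version B (the rewrite author's own statement) =====
-- stated objective: simpler
-- what changed: A loops over arrivals and advances a bus pointer while building a per-bus list-of-lists; B loops over the buses in departure order, consuming the sorted arrivals with a single pointer and keeping only the current bus's boarded count and last boarded minute, so no bus table is built.
-- outside the precondition, e.g. on solution(1, 1, 0, []): A returns '08:59', B raises TypeError
import Mathlib
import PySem

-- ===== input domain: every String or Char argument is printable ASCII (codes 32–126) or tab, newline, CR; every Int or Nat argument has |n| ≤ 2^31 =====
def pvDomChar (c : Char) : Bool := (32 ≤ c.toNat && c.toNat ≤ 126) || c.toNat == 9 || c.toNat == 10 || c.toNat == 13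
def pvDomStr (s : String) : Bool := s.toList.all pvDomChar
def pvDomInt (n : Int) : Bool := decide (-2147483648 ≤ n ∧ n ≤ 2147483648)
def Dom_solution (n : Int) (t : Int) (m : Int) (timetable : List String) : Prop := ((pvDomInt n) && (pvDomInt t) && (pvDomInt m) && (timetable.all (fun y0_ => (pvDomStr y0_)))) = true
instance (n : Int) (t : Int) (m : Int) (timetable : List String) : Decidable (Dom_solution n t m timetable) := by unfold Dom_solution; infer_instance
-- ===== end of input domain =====

-- B boards crew bus-by-bus with one pointer into the sorted arrivals, keeping only the
-- current bus's boarded count and last boarded minute, instead of A's per-bus list table.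

-- shared module helpers (get_minute / get_time), used by both Pythons
def getMinute (s : String) : Int :=
  match (PySem.Str.split? s ":").getD [] with
  | [h, mm] => (PySem.Int.ofStr? h).getD 0 * 60 + (PySem.Int.ofStr? mm).getD 0
  | _ => 0

def getTime (minute : Int) : String :=
  let h := PySem.Int.floordiv minute 60
  let mm := PySem.Int.mod minute 60
  PySem.Str.zfill (PySem.Int.toStr h) 2 ++ ":" ++ PySem.Str.zfill (PySem.Int.toStr mm) 2

-- ===== PORT A =====
-- while i < n: advance past buses that already departed before `arrive` or are full
def aAdvance (n m arrive : Int) (bus : List (List Int)) (i : Int) : Int :=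
  if _h : i < n then
    let bi := (PySem.List.pyGet? bus i).getD []
    if (PySem.List.pyGet? bi 0).getD 0 ≥ arrive ∧ (bi.length : Int) < m + 1 then i
    else aAdvance n m arrive bus (i + 1)
  else i
termination_by (n - i).toNat
decreasing_by omega

-- for arrive in timetable: … (break when i reaches n)
def aFor (n m : Int) (arrs : List Int) (i : Int) (bus : List (List Int)) : List (List Int) :=
  match arrs with
  | [] => bus
  | a :: rest =>
    let i' := aAdvance n m a bus i
    if i' < n then aFor n m rest i' (bus.modify i'.toNat (fun l => l ++ [a]))
    else bus

def solution (n : Int) (t : Int) (m : Int) (timetable : List String) : String :=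
  let start : Int := 9 * 60
  let bus : List (List Int) := (PySem.List.pyRange 0 n 1).map (fun i => [start + t * i])
  let tt : List Int := PySem.List.sorted (timetable.map getMinute) (fun x => x) false
  let bus' := aFor n m tt 0 bus
  let lastBus := (PySem.List.pyGet? bus' (-1)).getD []
  if (lastBus.length : Int) < m + 1 then getTime ((PySem.List.pyGet? lastBus 0).getD 0)
  else getTime (((PySem.List.pyGet? lastBus (-1)).getD 0) - 1)

-- ===== PORT B =====
-- while p < len(arr) and boarded < m and arr[p] <= dep: board (consume from arr)
def bBoard (m d : Int) (cnt : Int) (last : Option Int) (arr : List Int) : Int × Option Int × List Int :=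
  match arr with
  | [] => (cnt, last, [])
  | a :: rest => if cnt < m ∧ a ≤ d then bBoard m d (cnt + 1) (some a) rest else (cnt, last, a :: rest)

-- for k in range(n): … (k counted down; d is the current departure time)
def bLoop (m t : Int) (k : Nat) (d : Int) (arr : List Int) : Int × Option Int × Int :=
  let r := bBoard m d 0 none arr
  match k with
  | 0 => (r.1, r.2.1, d)
  | k' + 1 => bLoop m t k' (d + t) r.2.2

def solution_alt (n : Int) (t : Int) (m : Int) (timetable : List String) : String :=
  let arr : List Int := PySem.List.sorted (timetable.map getMinute) (fun x => x) false
  let r := bLoop m t (n - 1).toNat 540 arr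
  if r.1 < m then getTime r.2.2 else getTime ((r.2.1.getD 0) - 1)

-- ===== PRECONDITION & SPEC =====
-- Pre_ keeps the problem's natural domain n ≥ 1, m ≥ 1 and well-formed "H:M" entries:
-- for n ≤ 0 or a malformed entry Python A raises (IndexError / ValueError); for m ≤ 0
-- (capacity-zero buses, a degenerate corner) A happens to return get_time(dep-1) via the
-- departure entry left in its bus list while B's natural last-boarded tracking raises.
def Pre_solution (n : Int) (t : Int) (m : Int) (timetable : List String) : Prop :=
  1 ≤ n ∧ 1 ≤ m ∧ ∀ s ∈ timetable,
    ((PySem.Str.split? s ":").getD []).length = 2 ∧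
    ∀ p ∈ (PySem.Str.split? s ":").getD [], (PySem.Int.ofStr? p).isSome
instance (n : Int) (t : Int) (m : Int) (timetable : List String) : Decidable (Pre_solution n t m timetable) := by unfold Pre_solution; infer_instance

def pvWitness_solution : Int × Int × Int × List String := (2, 10, 2, ["09:05", "08:30", "09:20"])

def Spec_solution (n : Int) (t : Int) (m : Int) (timetable : List String) (out : String) : Prop := out = solution_alt n t m timetable
instance (n : Int) (t : Int) (m : Int) (timetable : List String) (out : String) : Decidable (Spec_solution n t m timetable out) := by unfold Spec_solution; infer_instance

-- ===== CLAIM (what is proved, stated in full; the proofs are below) =====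
def Claim_equal_solution : Prop := ∀ (n : Int) (t : Int) (m : Int) (timetable : List String), Dom_solution n t m timetable → Pre_solution n t m timetable → Spec_solution n t m timetable (solution n t m timetable)

-- ===== LEMMAS AND PROOFS =====

-- the untouched buses after the current one: [ [d+t], [d+2t], …, [d+kt] ]
def tails (t d : Int) : Nat → List (List Int)
  | 0 => []
  | k + 1 => [d + t] :: tails t (d + t) k

-- B's loop resumed from the middle of a bus (cnt boarded so far, last the last boarded)
def bCont (m t : Int) (k : Nat) (d cnt : Int) (last : Option Int) (arr : List Int) : Int × Option Int × Int :=
  let r := bBoard m d cnt last arr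
  match k with
  | 0 => (r.1, r.2.1, d)
  | k' + 1 => bLoop m t k' (d + t) r.2.2

-- the common read-out of the final state
def answerA (m : Int) (bus : List (List Int)) : String :=
  let lastBus := (PySem.List.pyGet? bus (-1)).getD []
  if (lastBus.length : Int) < m + 1 then getTime ((PySem.List.pyGet? lastBus 0).getD 0)
  else getTime (((PySem.List.pyGet? lastBus (-1)).getD 0) - 1)

def finish (m : Int) (r : Int × Option Int × Int) : String :=
  if r.1 < m then getTime r.2.2 else getTime ((r.2.1.getD 0) - 1)

lemma bLoop_eq_bCont (m t : Int) (k : Nat) (d : Int) (arr : List Int) :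
    bLoop m t k d arr = bCont m t k d 0 none arr := by
  cases k <;> rfl

lemma bLoop_nil (m t : Int) : ∀ (k : Nat) (d : Int), bLoop m t k d [] = (0, none, d + t * k) := by
  intro k
  induction k with
  | zero => intro d; simp [bLoop, bBoard]
  | succ j ih => intro d; simp only [bLoop, bBoard]; rw [ih]; congr 2; push_cast; ring

lemma tails_getLast (t : Int) :
    ∀ (j : Nat) (d : Int), (tails t d (j + 1)).getLast? = some [d + t * (j + 1)] := by
  intro j
  induction j with
  | zero => intro d; simp [tails]
  | succ i ih =>
    intro d
    show ([d + t] :: tails t (d + t) (i + 1)).getLast? = _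
    rw [List.getLast?_cons, ih (d + t)]
    simp only [Option.getD_some, Option.some.injEq, List.cons.injEq, and_true]
    push_cast; ring

lemma getLast?_shape (pre : List (List Int)) (cur : List Int) (t : Int) :
    ∀ (k : Nat) (d : Int), (pre ++ cur :: tails t d k).getLast? =
      some (match k with | 0 => cur | Nat.succ j => [d + t * (j + 1)]) := by
  intro k d
  rw [List.getLast?_append]
  cases k with
  | zero => simp [tails]
  | succ j => rw [List.getLast?_cons, tails_getLast t j d]; rfl

lemma modify_append_length (pre : List (List Int)) (x : List Int) (rest : List (List Int)) (f : List Int → List Int) :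
    (pre ++ x :: rest).modify pre.length f = pre ++ f x :: rest := by
  induction pre with
  | nil => simp
  | cons p ps ih => simpa [List.modify_succ_cons] using ih

lemma aAdvance_stop (n m a : Int) (bus : List (List Int)) (i : Int) (hi : i < n)
    (h : (PySem.List.pyGet? ((PySem.List.pyGet? bus i).getD []) 0).getD 0 ≥ a ∧
         ((((PySem.List.pyGet? bus i).getD []).length : Int)) < m + 1) :
    aAdvance n m a bus i = i := by
  rw [aAdvance, dif_pos hi]; simp only []; rw [if_pos h]

lemma aAdvance_step (n m a : Int) (bus : List (List Int)) (i : Int) (hi : i < n)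
    (h : ¬ ((PySem.List.pyGet? ((PySem.List.pyGet? bus i).getD []) 0).getD 0 ≥ a ∧
         ((((PySem.List.pyGet? bus i).getD []).length : Int)) < m + 1)) :
    aAdvance n m a bus i = aAdvance n m a bus (i + 1) := by
  rw [aAdvance, dif_pos hi]; simp only []; rw [if_neg h]

lemma aAdvance_ge (n m a : Int) (bus : List (List Int)) (i : Int) (hi : ¬ i < n) :
    aAdvance n m a bus i = i := by
  rw [aAdvance]; simp [hi]

lemma bBoard_cons_true (m d cnt : Int) (last : Option Int) (a : Int) (arr : List Int)
    (h : cnt < m ∧ a ≤ d) : bBoard m d cnt last (a :: arr) = bBoard m d (cnt + 1) (some a) arr := by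
  simp [bBoard, h]

lemma bBoard_cons_false (m d cnt : Int) (last : Option Int) (a : Int) (arr : List Int)
    (h : ¬ (cnt < m ∧ a ≤ d)) : bBoard m d cnt last (a :: arr) = (cnt, last, a :: arr) := by
  simp [bBoard, h]

lemma bCont_cons_true (m t : Int) (k : Nat) (d cnt : Int) (last : Option Int) (a : Int) (arr : List Int)
    (h : cnt < m ∧ a ≤ d) :
    bCont m t k d cnt last (a :: arr) = bCont m t k d (cnt + 1) (some a) arr := by
  cases k <;> simp only [bCont, bBoard_cons_true m d cnt last a arr h]

lemma bCont_zero_false (m t : Int) (d cnt : Int) (last : Option Int) (a : Int) (arr : List Int)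
    (h : ¬ (cnt < m ∧ a ≤ d)) : bCont m t 0 d cnt last (a :: arr) = (cnt, last, d) := by
  simp only [bCont, bBoard_cons_false m d cnt last a arr h]

lemma bCont_succ_false (m t : Int) (j : Nat) (d cnt : Int) (last : Option Int) (a : Int) (arr : List Int)
    (h : ¬ (cnt < m ∧ a ≤ d)) :
    bCont m t (j + 1) d cnt last (a :: arr) = bCont m t j (d + t) 0 none (a :: arr) := by
  simp only [bCont, bBoard_cons_false m d cnt last a arr h]
  exact bLoop_eq_bCont m t j (d + t) (a :: arr)

lemma bCont_nil_zero (m t : Int) (d cnt : Int) (last : Option Int) :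
    bCont m t 0 d cnt last [] = (cnt, last, d) := rfl

lemma bCont_nil_succ (m t : Int) (j : Nat) (d cnt : Int) (last : Option Int) :
    bCont m t (j + 1) d cnt last [] = (0, none, (d + t) + t * j) := by
  simp only [bCont, bBoard]
  exact bLoop_nil m t j (d + t)

lemma readout_last (m d : Int) (hm : 1 ≤ m) (pre : List (List Int)) (boarded : List Int) :
    answerA m (pre ++ [d :: boarded]) = finish m (boarded.length, boarded.getLast?, d) := by
  have hl : (pre ++ [d :: boarded]).getLast? = some (d :: boarded) := by
    simpa [tails] using getLast?_shape pre (d :: boarded) 0 0 0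
  unfold answerA finish
  rw [PySem.List.pyGet?_neg_one, hl]
  simp only [Option.getD_some]
  have hiff : ((d :: boarded).length : Int) < m + 1 ↔ (boarded.length : Int) < m := by
    simp only [List.length_cons]; push_cast; omega
  by_cases hcnt : (boarded.length : Int) < m
  · rw [if_pos (hiff.mpr hcnt), if_pos hcnt]
    simp [PySem.List.pyGet?_zero_cons]
  · rw [if_neg (fun hh => hcnt (hiff.mp hh)), if_neg hcnt]
    have hne : boarded ≠ [] := by
      intro h; subst h; simp only [List.length_nil, Nat.cast_zero] at hcnt; omega
    obtain ⟨y, hy⟩ := Option.isSome_iff_exists.mp (List.getLast?_isSome.mpr hne)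
    rw [PySem.List.pyGet?_neg_one, List.getLast?_cons, hy]
    simp

lemma readout_untouched (m t d : Int) (hm : 1 ≤ m) (pre : List (List Int)) (boarded : List Int) (j : Nat) :
    answerA m (pre ++ (d :: boarded) :: tails t d (j + 1)) = getTime (d + t * (j + 1)) := by
  unfold answerA
  rw [PySem.List.pyGet?_neg_one, getLast?_shape pre (d :: boarded) t (j + 1) d]
  simp only [Option.getD_some]
  rw [if_pos (by simp only [List.length_cons, List.length_nil]; push_cast; omega)]
  simp [PySem.List.pyGet?_zero_cons]

lemma main_lemma (m t : Int) (hm : 1 ≤ m) :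
    ∀ (arrs : List Int) (k : Nat) (d : Int) (pre : List (List Int)) (boarded : List Int)
      (n : Int), n = pre.length + 1 + k →
      answerA m (aFor n m arrs (pre.length) (pre ++ (d :: boarded) :: tails t d k)) =
        finish m (bCont m t k d boarded.length boarded.getLast? arrs) := by
  intro arrs
  induction arrs with
  | nil =>
    intro k d pre boarded n _hn
    simp only [aFor]
    cases k with
    | zero =>
      rw [show tails t d 0 = [] from rfl, bCont_nil_zero]
      exact readout_last m d hm pre boarded
    | succ j =>
      rw [readout_untouched m t d hm pre boarded j, bCont_nil_succ]
      unfold finish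
      rw [if_pos (by omega)]
      congr 1; push_cast; ring
  | cons a rest ih =>
    intro k
    induction k with
    | zero =>
      intro d pre boarded n hn
      have hbus0 : tails t d 0 = [] := rfl
      have hbi : (PySem.List.pyGet? (pre ++ (d :: boarded) :: tails t d 0) (pre.length : Int)).getD [] = d :: boarded := by
        rw [PySem.List.pyGet?_append_length]; rfl
      have hcond : ((PySem.List.pyGet? ((PySem.List.pyGet? (pre ++ (d :: boarded) :: tails t d 0) (pre.length : Int)).getD []) 0).getD 0 ≥ a ∧
          ((((PySem.List.pyGet? (pre ++ (d :: boarded) :: tails t d 0) (pre.length : Int)).getD []).length : Int)) < m + 1) ↔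
          ((boarded.length : Int) < m ∧ a ≤ d) := by
        rw [hbi]
        simp only [PySem.List.pyGet?_zero_cons, Option.getD_some, List.length_cons, ge_iff_le]
        push_cast; omega
      have hi : (pre.length : Int) < n := by rw [hn]; push_cast; omega
      by_cases hc : (boarded.length : Int) < m ∧ a ≤ d
      · have hadv := aAdvance_stop n m a (pre ++ (d :: boarded) :: tails t d 0) (pre.length : Int) hi (hcond.mpr hc)
        simp only [aFor]
        rw [hadv, if_pos hi, Int.toNat_natCast, modify_append_length]
        rw [show (d :: boarded) ++ [a] = d :: (boarded ++ [a]) from rfl]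
        rw [ih 0 d pre (boarded ++ [a]) n hn, bCont_cons_true m t 0 d _ _ a rest hc]
        congr 2
        · push_cast; simp
        · simp
      · have hadv : aAdvance n m a (pre ++ (d :: boarded) :: tails t d 0) (pre.length : Int) = (pre.length : Int) + 1 := by
          rw [aAdvance_step n m a _ _ hi (fun hh => hc (hcond.mp hh))]
          exact aAdvance_ge n m a _ _ (by rw [hn]; push_cast; omega)
        simp only [aFor]
        rw [hadv, if_neg (by rw [hn]; push_cast; omega)]
        rw [hbus0, bCont_zero_false m t d _ _ a rest hc]
        exact readout_last m d hm pre boarded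
    | succ j ihk =>
      intro d pre boarded n hn
      have hbi : (PySem.List.pyGet? (pre ++ (d :: boarded) :: tails t d (j + 1)) (pre.length : Int)).getD [] = d :: boarded := by
        rw [PySem.List.pyGet?_append_length]; rfl
      have hcond : ((PySem.List.pyGet? ((PySem.List.pyGet? (pre ++ (d :: boarded) :: tails t d (j + 1)) (pre.length : Int)).getD []) 0).getD 0 ≥ a ∧
          ((((PySem.List.pyGet? (pre ++ (d :: boarded) :: tails t d (j + 1)) (pre.length : Int)).getD []).length : Int)) < m + 1) ↔
          ((boarded.length : Int) < m ∧ a ≤ d) := by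
        rw [hbi]
        simp only [PySem.List.pyGet?_zero_cons, Option.getD_some, List.length_cons, ge_iff_le]
        push_cast; omega
      have hi : (pre.length : Int) < n := by rw [hn]; push_cast; omega
      by_cases hc : (boarded.length : Int) < m ∧ a ≤ d
      · have hadv := aAdvance_stop n m a (pre ++ (d :: boarded) :: tails t d (j + 1)) (pre.length : Int) hi (hcond.mpr hc)
        simp only [aFor]
        rw [hadv, if_pos hi, Int.toNat_natCast, modify_append_length]
        rw [show (d :: boarded) ++ [a] = d :: (boarded ++ [a]) from rfl]
        rw [ih (j + 1) d pre (boarded ++ [a]) n hn, bCont_cons_true m t (j + 1) d _ _ a rest hc]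
        congr 2
        · push_cast; simp
        · simp
      · have hadv := aAdvance_step n m a (pre ++ (d :: boarded) :: tails t d (j + 1)) (pre.length : Int) hi (fun hh => hc (hcond.mp hh))
        have hreshape : pre ++ (d :: boarded) :: tails t d (j + 1) =
            (pre ++ [d :: boarded]) ++ ((d + t) :: ([] : List Int)) :: tails t (d + t) j := by
          rw [List.append_assoc]; rfl
        have hstep : aFor n m (a :: rest) (pre.length : Int) (pre ++ (d :: boarded) :: tails t d (j + 1)) =
            aFor n m (a :: rest) ((pre.length : Int) + 1) (pre ++ (d :: boarded) :: tails t d (j + 1)) := by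
          simp only [aFor]; rw [hadv]
        have hlen : (((pre ++ [d :: boarded]).length : Nat) : Int) = (pre.length : Int) + 1 := by
          push_cast; simp
        have := ihk (d + t) (pre ++ [d :: boarded]) [] n (by rw [hn]; push_cast; simp; omega)
        rw [hstep, hreshape, ← hlen, this]
        rw [bCont_succ_false m t j d _ _ a rest hc]
        rfl

lemma range_map_tails (t : Int) : ∀ (k : Nat) (d : Int),
    (List.range k).map (fun j : Nat => [d + t * ((j : Int) + 1)]) = tails t d k := by
  intro k
  induction k with
  | zero => intro d; rfl
  | succ i ih =>
    intro d
    rw [List.range_succ_eq_map, List.map_cons, List.map_map]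
    show _ :: _ = [d + t] :: tails t (d + t) i
    congr 1
    · norm_num
    · rw [← ih (d + t)]
      apply List.map_congr_left
      intro x _
      simp only [Function.comp_apply, List.cons.injEq, and_true]
      push_cast; ring

theorem solution_eq (n t m : Int) (timetable : List String)
    (hn : 1 ≤ n) (hm : 1 ≤ m) : solution n t m timetable = solution_alt n t m timetable := by
  have hA : solution n t m timetable =
      answerA m (aFor n m (PySem.List.sorted (timetable.map getMinute) (fun x => x) false) 0
        ((PySem.List.pyRange 0 n 1).map (fun i => [9 * 60 + t * i]))) := rfl
  have hB : solution_alt n t m timetable =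
      finish m (bLoop m t (n - 1).toNat 540 (PySem.List.sorted (timetable.map getMinute) (fun x => x) false)) := rfl
  have hbus : (PySem.List.pyRange 0 n 1).map (fun i => [9 * 60 + t * i]) =
      ((540 : Int) :: []) :: tails t 540 (n - 1).toNat := by
    rw [PySem.List.pyRange_one, List.map_map]
    have hnn : (n - 0).toNat = (n - 1).toNat + 1 := by omega
    rw [hnn, List.range_succ_eq_map, List.map_cons, List.map_map]
    congr 1
    · show [9 * 60 + t * ((0 : Int) + (0 : Nat))] = [(540 : Int)]
      norm_num
    · rw [← range_map_tails t (n - 1).toNat 540]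
      apply List.map_congr_left
      intro x _
      simp only [Function.comp_apply, List.cons.injEq, and_true]
      push_cast; ring
  have hmain := main_lemma m t hm (PySem.List.sorted (timetable.map getMinute) (fun x => x) false)
      (n - 1).toNat 540 [] [] n (by simp only [List.length_nil, Nat.cast_zero]; omega)
  simp only [List.nil_append, List.length_nil, Nat.cast_zero, List.getLast?_nil] at hmain
  rw [hA, hB, hbus, hmain, bLoop_eq_bCont]

-- ===== VERDICT (by name: the statement is the Claim_ definition above) =====
theorem solution_spec : Claim_equal_solution := by
  intro n t m timetable _hdom hpre
  exact solution_eq n t m timetable hpre.1 hpre.2.1
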